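-- pv_equiv track=rewrite | github.com/cf16/python | distance.py | distance_notsimple
-- ===== SOURCE A (Python) =====
-- def distance_notsimple(vertices1,vertices2):
--     # print path up to root vertex
--     id1 = vertices1[0]
--     id2 = vertices2[0]
--     length1 = 0
--     length2 = 0
--     while 1:
--         # count path1 and path2 until vertex in vertices1 is
--         # found in path2, then return sum of lengths
--         found = False
--         for it1 in vertices1:
--             for it2 in vertices2:
--                 if it1 == it2:
--                     # found common vertex
--                     found = True
--                     return pow(2,length1) + pow(2,length2) - 2
--                 length2 = length2 + 1
--             length2 = 0
--             length1 = length1 + 1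
--         if found == False:
--             # not found, error
--             raise ValueError("No common vertex found.\n")
--     return -1
-- ===== SOURCE B (Python) =====
-- def distance_notsimple(vertices1, vertices2):
--     # index of first occurrence of each vertex in vertices2
--     idx = {}
--     for j, v in enumerate(vertices2):
--         idx.setdefault(v, j)
--     for i, v in enumerate(vertices1):
--         j = idx.get(v)
--         if j is not None:
--             return 2 ** i + 2 ** j - 2
--     raise ValueError("No common vertex found.\n")
-- ===== Notes on version B (the rewrite author's own statement) =====
-- stated objective: alternative
-- what changed: replaces the nested scan of vertices2 for every element of vertices1 by a first-index dict of vertices2 built once, then a single scan of vertices1 (worst-case O(n+m) vs O(n*m), but not measurably faster on the random timing inputs, which hit an early match)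
import Mathlib
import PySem

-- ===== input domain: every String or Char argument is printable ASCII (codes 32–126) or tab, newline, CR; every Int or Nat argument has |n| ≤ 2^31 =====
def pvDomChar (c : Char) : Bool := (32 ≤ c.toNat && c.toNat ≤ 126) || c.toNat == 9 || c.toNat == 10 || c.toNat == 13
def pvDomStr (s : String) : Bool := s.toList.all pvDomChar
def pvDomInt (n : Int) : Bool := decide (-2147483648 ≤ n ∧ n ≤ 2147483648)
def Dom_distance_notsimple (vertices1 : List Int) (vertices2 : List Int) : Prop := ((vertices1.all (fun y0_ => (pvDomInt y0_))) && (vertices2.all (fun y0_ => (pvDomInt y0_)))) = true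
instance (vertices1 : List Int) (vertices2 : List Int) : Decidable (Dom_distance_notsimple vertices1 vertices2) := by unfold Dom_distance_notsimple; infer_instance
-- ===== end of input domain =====

-- B replaces A's nested rescans of vertices2 by a first-index dict built once plus one scan of vertices1 (alternative algorithm, same observed cost).


-- ===== PORT A =====
-- inner 'for it2 in vertices2' loop; length2 counts from 0 each round
def aInner (it1 : Int) : List Int → Nat → Nat → Option Int
  | [], _, _ => none
  | it2 :: rest, length1, length2 =>
      if it1 = it2 then some ((2:Int) ^ length1 + (2:Int) ^ length2 - 2)
      else aInner it1 rest length1 (length2 + 1)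

-- outer 'for it1 in vertices1' loop
def aOuter : List Int → List Int → Nat → Option Int
  | [], _, _ => none
  | it1 :: rest, vertices2, length1 =>
      match aInner it1 vertices2 length1 0 with
      | some r => some r
      | none => aOuter rest vertices2 (length1 + 1)

-- vertices1[0] / vertices2[0] raise IndexError on [], and the loop raises ValueError
-- when no common vertex exists: those inputs are outside Pre_ (value 0 is arbitrary there).
def distance_notsimple (vertices1 : List Int) (vertices2 : List Int) : Int :=
  match PySem.List.pyGet? vertices1 0, PySem.List.pyGet? vertices2 0 with
  | some _, some _ => (aOuter vertices1 vertices2 0).getD 0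
  | _, _ => 0

-- ===== PORT B =====
-- idx.setdefault(v, j) over enumerate(vertices2)
def bBuild : List Int → Int → PySem.Dict Int Int → PySem.Dict Int Int
  | [], _, d => d
  | v :: rest, j, d => bBuild rest (j + 1) (d.setdefault v j)

-- scan of vertices1 with idx.get(v); none = ValueError (outside Pre_)
def bScan (idx : PySem.Dict Int Int) : List Int → Nat → Option Int
  | [], _ => none
  | v :: rest, i =>
      match idx.get? v with
      | some j => some ((2:Int) ^ i + (2:Int) ^ j.toNat - 2)
      | none => bScan idx rest (i + 1)

def distance_notsimple_alt (vertices1 : List Int) (vertices2 : List Int) : Int :=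
  (bScan (bBuild vertices2 0 PySem.Dict.empty) vertices1 0).getD 0

-- ===== PRECONDITION & SPEC =====
-- A raises IndexError when either list is empty and ValueError when the lists share no vertex; exactly those inputs are excluded.
def Pre_distance_notsimple (vertices1 : List Int) (vertices2 : List Int) : Prop :=
  vertices1 ≠ [] ∧ vertices2 ≠ [] ∧ ∃ x ∈ vertices1, x ∈ vertices2
instance (vertices1 : List Int) (vertices2 : List Int) : Decidable (Pre_distance_notsimple vertices1 vertices2) := by unfold Pre_distance_notsimple; infer_instance
def pvWitness_distance_notsimple : List Int × List Int := ([3, 1], [2, 1])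

def Spec_distance_notsimple (vertices1 : List Int) (vertices2 : List Int) (out : Int) : Prop := out = distance_notsimple_alt vertices1 vertices2
instance (vertices1 : List Int) (vertices2 : List Int) (out : Int) : Decidable (Spec_distance_notsimple vertices1 vertices2 out) := by unfold Spec_distance_notsimple; infer_instance

-- ===== CLAIM (what is proved, stated in full; the proofs are below) =====
def Claim_equal_distance_notsimple : Prop := ∀ (vertices1 : List Int) (vertices2 : List Int), Dom_distance_notsimple vertices1 vertices2 → Pre_distance_notsimple vertices1 vertices2 → Spec_distance_notsimple vertices1 vertices2 (distance_notsimple vertices1 vertices2)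

-- ===== LEMMAS AND PROOFS =====

-- first index of v in a list
def firstIdx (v : Int) : List Int → Option Nat
  | [] => none
  | x :: rest => if v = x then some 0 else (firstIdx v rest).map (· + 1)

theorem aInner_eq (it1 : Int) (xs : List Int) (l1 l2 : Nat) :
    aInner it1 xs l1 l2 = (firstIdx it1 xs).map (fun j => (2:Int) ^ l1 + (2:Int) ^ (l2 + j) - 2) := by
  induction xs generalizing l2 with
  | nil => rfl
  | cons x rest ih =>
      simp only [aInner, firstIdx]
      by_cases h : it1 = x
      · simp [h]
      · simp only [if_neg h, ih (l2 + 1), Option.map_map]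
        congr 1
        funext j
        simp only [Function.comp]
        ring_nf

theorem bBuild_get? (xs : List Int) (j0 : Int) (d : PySem.Dict Int Int) (v : Int) :
    (bBuild xs j0 d).get? v =
      match d.get? v with
      | some w => some w
      | none => (firstIdx v xs).map (fun j => j0 + (j : Int)) := by
  induction xs generalizing j0 d with
  | nil => cases h : d.get? v <;> simp [bBuild, firstIdx, h]
  | cons x rest ih =>
      simp only [bBuild, ih]
      by_cases hv : v = x
      · subst hv
        rw [PySem.Dict.get?_setdefault_self]
        cases h : d.get? v <;> simp [firstIdx]
      · have hset : (d.setdefault x j0).get? v = d.get? v := by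
          cases hc : d.contains x with
          | true => rw [PySem.Dict.setdefault_of_contains d j0 hc]
          | false =>
              rw [PySem.Dict.setdefault_of_not_contains d j0 hc,
                PySem.Dict.get?_insert_of_ne d j0 hv]
        rw [hset]
        cases h : d.get? v with
        | some w => rfl
        | none =>
            simp only [firstIdx, if_neg hv]
            cases firstIdx v rest with
            | none => rfl
            | some j =>
                simp
                ring

theorem scan_eq (v2 : List Int) (v1 : List Int) (l1 : Nat) :
    aOuter v1 v2 l1 = bScan (bBuild v2 0 PySem.Dict.empty) v1 l1 := by
  induction v1 generalizing l1 with
  | nil => rfl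
  | cons x rest ih =>
      simp only [aOuter, bScan, aInner_eq, bBuild_get?, PySem.Dict.get?_empty]
      cases h : firstIdx x v2 with
      | none => simpa using ih (l1 + 1)
      | some j => simp

-- ===== VERDICT (by name: the statement is the Claim_ definition above) =====
theorem distance_notsimple_spec : Claim_equal_distance_notsimple := by
  intro v1 v2 _ hpre
  obtain ⟨h1, h2, _⟩ := hpre
  obtain ⟨a, t1, rfl⟩ := List.exists_cons_of_ne_nil h1
  obtain ⟨b, t2, rfl⟩ := List.exists_cons_of_ne_nil h2
  unfold Spec_distance_notsimple distance_notsimple distance_notsimple_alt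
  simp only [PySem.List.pyGet?, PySem.List.pyIdx?]
  norm_num [scan_eq]
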